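-- pv_equiv track=rewrite | github.com/hioos11/Algorithm | programmers/더 맵게.py | solution
-- ===== SOURCE A (Python) =====
-- import heapq
-- import heapq
--
-- def solution(scoville, K):
--     answer = 0
--     heap = []
--     for num in scoville:
--         heapq.heappush(heap, num)
--
--     while heap[0] < K:
--         try:
--             heapq.heappush(heap, heapq.heappop(heap) + (heapq.heappop(heap)*2))
--         except IndexError:
--             return -1
--         answer+= 1
--     return answer
-- ===== SOURCE B (Python) =====
-- def solution(scoville, K):
--     # sorted list instead of a heap: pop the two smallest from the front,
--     # insert the mix back at its ordered position
--     q = sorted(scoville)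
--     count = 0
--     while q[0] < K:
--         if len(q) < 2:
--             return -1
--         a = q.pop(0)
--         b = q.pop(0)
--         x = a + 2 * b
--         i = 0
--         while i < len(q) and q[i] < x:
--             i += 1
--         q.insert(i, x)
--         count += 1
--     return count
-- ===== Notes on version B (the rewrite author's own statement) =====
-- stated objective: alternative
-- what changed: Replaces the binary heap with a single sort followed by a sorted-list simulation: the two smallest elements are popped from the front and the mixed value is re-inserted at its ordered position, and -1 comes from an explicit length check instead of a caught IndexError.
import Mathlib
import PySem

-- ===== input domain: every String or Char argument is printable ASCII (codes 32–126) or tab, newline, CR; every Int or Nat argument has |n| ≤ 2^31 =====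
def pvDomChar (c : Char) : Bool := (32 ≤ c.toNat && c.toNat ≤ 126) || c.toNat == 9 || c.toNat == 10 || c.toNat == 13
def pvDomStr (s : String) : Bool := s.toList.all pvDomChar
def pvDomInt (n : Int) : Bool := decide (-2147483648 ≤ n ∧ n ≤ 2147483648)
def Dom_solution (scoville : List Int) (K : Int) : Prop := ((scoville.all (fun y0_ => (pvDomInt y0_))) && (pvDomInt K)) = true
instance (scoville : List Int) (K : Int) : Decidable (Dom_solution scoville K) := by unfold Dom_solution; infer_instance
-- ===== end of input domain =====

-- B replaces A's binary heap by one sort plus an ordered re-insertion loop (alternative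
-- decomposition, same values); Pre_ excludes only the empty list, where A raises IndexError.


-- ===== PORT A =====
-- heapq on ints is modelled by its value semantics (exact for Int elements):
-- heap[0] / heappop look at the minimum, heappop removes one occurrence of it.
-- The while loop: pop two minima, push their mix; a failing second pop returns -1.
def solutionLoop (heap : List Int) (K : Int) (answer : Int) : Int :=
  match h : heap.min? with
  | none => 0            -- unreachable under Pre_: empty heap means Python raised IndexError
  | some m =>
    if m < K then
      match h1 : (heap.erase m).min? with
      | none => -1       -- second heappop raised IndexError
      | some m2 => solutionLoop (((heap.erase m).erase m2) ++ [m + m2 * 2]) K (answer + 1)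
    else answer
termination_by heap.length
decreasing_by
  have hm : m ∈ heap := List.min?_mem h
  have hm2 : m2 ∈ heap.erase m := List.min?_mem h1
  have e1 : (heap.erase m).length = heap.length - 1 := List.length_erase_of_mem hm
  have e2 : ((heap.erase m).erase m2).length = (heap.erase m).length - 1 := List.length_erase_of_mem hm2
  have hp : 0 < heap.length := List.length_pos_of_mem hm
  have hp2 : 0 < (heap.erase m).length := List.length_pos_of_mem hm2
  simp only [List.length_append, List.length_cons, List.length_nil, e2, e1]
  omega

def solution (scoville : List Int) (K : Int) : Int :=
  solutionLoop (scoville.foldl (fun heap num => heap ++ [num]) []) K 0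

-- ===== PORT B =====
-- ordered insertion: the inner 'while i < len(q) and q[i] < x' scan plus q.insert(i, x)
def insertAsc (x : Int) : List Int → List Int
  | [] => [x]
  | y :: ys => if y < x then y :: insertAsc x ys else x :: y :: ys

lemma length_insertAsc (x : Int) (l : List Int) : (insertAsc x l).length = l.length + 1 := by
  induction l with
  | nil => rfl
  | cons z zs ih => simp only [insertAsc]; split <;> simp [ih]

def solutionAltLoop (q : List Int) (K : Int) (count : Int) : Int :=
  match q with
  | [] => 0              -- unreachable under Pre_: q[0] raises IndexError in Python
  | a :: rest =>
    if a < K then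
      match rest with
      | [] => -1         -- len(q) < 2
      | b :: rest' => solutionAltLoop (insertAsc (a + 2 * b) rest') K (count + 1)
    else count
termination_by q.length
decreasing_by
  simp only [List.length_cons, length_insertAsc]
  omega

def solution_alt (scoville : List Int) (K : Int) : Int :=
  solutionAltLoop (PySem.List.sorted scoville (fun x => x) false) K 0

-- ===== PRECONDITION & SPEC =====
-- Pre_ excludes exactly the empty list: there Python A raises IndexError on heap[0] (and B on q[0]).
def Pre_solution (scoville : List Int) (K : Int) : Prop := scoville ≠ []
instance (scoville : List Int) (K : Int) : Decidable (Pre_solution scoville K) := by unfold Pre_solution; infer_instance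
def pvWitness_solution : List Int × Int := ([1, 2, 3, 9, 10, 12], 7)
def Spec_solution (scoville : List Int) (K : Int) (out : Int) : Prop := out = solution_alt scoville K
instance (scoville : List Int) (K : Int) (out : Int) : Decidable (Spec_solution scoville K out) := by unfold Spec_solution; infer_instance

-- ===== CLAIM (what is proved, stated in full; the proofs are below) =====
def Claim_equal_solution : Prop := ∀ (scoville : List Int) (K : Int), Dom_solution scoville K → Pre_solution scoville K → Spec_solution scoville K (solution scoville K)

-- ===== LEMMAS AND PROOFS =====

lemma perm_insertAsc (x : Int) (l : List Int) : (insertAsc x l).Perm (x :: l) := by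
  induction l with
  | nil => rfl
  | cons z zs ih =>
    simp only [insertAsc]
    split
    · exact (ih.cons z).trans (List.Perm.swap x z zs)
    · rfl

lemma sorted_insertAsc (x : Int) (l : List Int) (h : l.Pairwise (· ≤ ·)) :
    (insertAsc x l).Pairwise (· ≤ ·) := by
  induction l with
  | nil => simp [insertAsc]
  | cons z zs ih =>
    rw [List.pairwise_cons] at h
    simp only [insertAsc]
    split
    · rename_i hz
      rw [List.pairwise_cons]
      refine ⟨fun b hb => ?_, ih h.2⟩
      rcases List.mem_cons.mp ((perm_insertAsc x zs).mem_iff.mp hb) with hb | hb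
      · omega
      · exact h.1 b hb
    · rename_i hz
      rw [List.pairwise_cons, List.pairwise_cons]
      exact ⟨fun b hb => by rcases List.mem_cons.mp hb with hb | hb; · omega
                            · exact le_trans (by omega) (h.1 b hb), h.1, h.2⟩

lemma min?_of_perm_sorted {heap : List Int} {a : Int} {rest : List Int}
    (hp : heap.Perm (a :: rest)) (hs : (a :: rest).Pairwise (· ≤ ·)) :
    heap.min? = some a := by
  rw [List.pairwise_cons] at hs
  rw [List.min?_eq_some_iff]
  refine ⟨hp.mem_iff.mpr (List.mem_cons_self), fun b hb => ?_⟩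
  rcases List.mem_cons.mp (hp.mem_iff.mp hb) with hb | hb
  · omega
  · exact hs.1 b hb

lemma solLoop_none {heap : List Int} {K ans : Int} (h : heap.min? = none) :
    solutionLoop heap K ans = 0 := by
  rw [solutionLoop]
  split
  · rfl
  · rename_i m hm; rw [h] at hm; cases hm

lemma solLoop_some {heap : List Int} {K ans m : Int} (h : heap.min? = some m) :
    solutionLoop heap K ans =
      if m < K then
        (match (heap.erase m).min? with
         | none => -1
         | some m2 => solutionLoop (((heap.erase m).erase m2) ++ [m + m2 * 2]) K (ans + 1))
      else ans := by
  rw [solutionLoop]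
  split
  · rename_i hm; rw [h] at hm; cases hm
  · rename_i m' hm
    rw [h] at hm
    injection hm with hm'
    subst hm'
    by_cases hK : m < K
    · simp only [if_pos hK]
      split
      · rename_i h1; rw [h1]
      · rename_i m2 h1; rw [h1]
    · simp only [if_neg hK]

lemma loop_eq : ∀ n heap q K ans, heap.length ≤ n → heap.Perm q → q.Pairwise (· ≤ ·) →
    solutionLoop heap K ans = solutionAltLoop q K ans := by
  intro n
  induction n with
  | zero =>
    intro heap q K ans hlen hp _
    have hnil : heap = [] := List.length_eq_zero_iff.mp (Nat.le_zero.mp hlen)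
    subst hnil
    have hq : q = [] := hp.symm.eq_nil
    subst hq
    rw [solLoop_none (by simp), solutionAltLoop.eq_def]
  | succ n ih =>
    intro heap q K ans hlen hp hs
    cases q with
    | nil =>
      have hnil : heap = [] := hp.eq_nil
      subst hnil
      rw [solLoop_none (by simp), solutionAltLoop.eq_def]
    | cons a rest =>
      have hmin : heap.min? = some a := min?_of_perm_sorted hp hs
      rw [solLoop_some hmin, solutionAltLoop.eq_def]
      simp only []
      by_cases haK : a < K
      · rw [if_pos haK, if_pos haK]
        have hp1 : (heap.erase a).Perm rest := by
          have := hp.erase a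
          simpa using this
        cases rest with
        | nil =>
          have h1 : heap.erase a = [] := hp1.eq_nil
          rw [h1]
          rfl
        | cons b rest' =>
          have hs1 : (b :: rest').Pairwise (· ≤ ·) := (List.pairwise_cons.mp hs).2
          have hmin1 : (heap.erase a).min? = some b := min?_of_perm_sorted hp1 hs1
          rw [hmin1]
          have hp2 : ((heap.erase a).erase b).Perm rest' := by
            have := hp1.erase b
            simpa using this
          have hlen2 : (((heap.erase a).erase b) ++ [a + b * 2]).length ≤ n := by
            have ha : a ∈ heap := List.min?_mem hmin
            have hb : b ∈ heap.erase a := List.min?_mem hmin1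
            have e1 : (heap.erase a).length = heap.length - 1 := List.length_erase_of_mem ha
            have e2 : ((heap.erase a).erase b).length = (heap.erase a).length - 1 :=
              List.length_erase_of_mem hb
            have hp0 : 0 < heap.length := List.length_pos_of_mem ha
            have hp02 : 0 < (heap.erase a).length := List.length_pos_of_mem hb
            simp only [List.length_append, List.length_cons, List.length_nil, e2, e1]
            omega
          have hperm : (((heap.erase a).erase b) ++ [a + b * 2]).Perm (insertAsc (a + 2 * b) rest') := by
            have h0 : (((heap.erase a).erase b) ++ [a + b * 2]).Perm ((a + b * 2) :: ((heap.erase a).erase b)) :=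
              List.perm_append_singleton _ _
            have h2 : ((a + b * 2) :: ((heap.erase a).erase b)).Perm ((a + 2 * b) :: rest') := by
              rw [(by ring : a + b * 2 = a + 2 * b)]
              exact hp2.cons _
            exact (h0.trans h2).trans (perm_insertAsc _ _).symm
          exact ih _ _ K (ans + 1) hlen2 hperm
            (sorted_insertAsc _ _ (List.pairwise_cons.mp hs1).2)
      · rw [if_neg haK, if_neg haK]

lemma foldl_push (scoville : List Int) : ∀ acc : List Int,
    scoville.foldl (fun heap num => heap ++ [num]) acc = acc ++ scoville := by
  induction scoville with
  | nil => simp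
  | cons x xs ih => intro acc; simp [List.foldl_cons, ih]

theorem solution_spec_aux (scoville : List Int) (K : Int) :
    solution scoville K = solution_alt scoville K := by
  unfold solution solution_alt
  rw [foldl_push scoville [], List.nil_append]
  exact loop_eq scoville.length scoville _ K 0 le_rfl
    (PySem.List.sorted_perm scoville (fun x => x) false).symm
    (PySem.List.sorted_pairwise scoville (fun x => x))

-- ===== VERDICT (by name: the statement is the Claim_ definition above) =====
theorem solution_spec : Claim_equal_solution := by
  intro scoville K _ hpre
  unfold Spec_solution
  exact solution_spec_aux scoville K
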